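-- pv_equiv track=rewrite | github.com/VIBogdanov/demo-python | src/puzzles.py | get_minmax_prod
-- ===== SOURCE A (Python) =====
-- from collections.abc import Generator, Iterable, Iterator
-- from typing import Any, TypeAlias, TypeVar
--
-- TIntNone: TypeAlias = int | None
--
-- def get_minmax_prod(iterable: Iterable[int]) -> tuple[TIntNone, TIntNone]:
--     """
--     Находит две пары множителей в массиве чисел, дабы получить минимально возможное
--     и максимально возможное произведение. Допускаются отрицательные значения и ноль.
--
--     Details: Попытка реализовать максимально обобщенный вариант без индексирования,
--     без сортировки, без вычисления размера данных и без изменения исходных данных.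
--     Используется только итератор.
--
--     Args:
--         iterable: Набор чисел.
--
--     Returns:
--         tuple(min, max): Пара минимального и максимального значений произведения.
--     """
--     result: tuple[TIntNone, TIntNone] = (None, None)
--     # Получаем итератор для однократного прохождения по элементам данных.
--     # По производительности сравнимо с сортировкой, но при этом не модифицирует исходные данные.
--     it_elements: Iterator[int] = iter(iterable)
--
--     # Инициализируем первыми значениями исходных данных.
--     try:
--         min1 = max1 = next(it_elements)
--     except StopIteration:
--         return result  # Если список исходных данных пуст
--
--     try:
--         min2 = max2 = next(it_elements)
--     except StopIteration:
--         return (min1, max1)  # Список исходных данных состоит из одного значения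
--
--     # Важно изначально инициализировать min и max корректными относительными значениями
--     if min2 < min1:
--         min1, min2 = min2, min1
--
--     if max1 < max2:
--         max1, max2 = max2, max1
--
--     for elm in it_elements:
--         # Вычисляем первые два минимальные значения
--         if elm < min1:
--             min1, min2 = elm, min1
--         elif elm < min2:
--             min2 = elm
--         #  и последние два максимальные значения
--         if max1 < elm:
--             max1, max2 = elm, max1
--         elif max2 < elm:
--             max2 = elm
--     # Данные произведения потребуются далее. Для читабельности кода.
--     min_prod = min1 * min2
--     max_prod = max1 * max2
--
--     match (min1 < 0, max1 < 0):
--         case (True, True):  # Все числа отрицательные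
--             result = (max_prod, min_prod)
--         case (True, False):  # Часть чисел отрицательные
--             result = (min1 * max1, min_prod if (max_prod < min_prod) else max_prod)
--         case (False, False):  # Все числа неотрицательные (включая ноль)
--             result = (min_prod, max_prod)
--     return result
-- ===== SOURCE B (Python) =====
-- def get_minmax_prod(iterable):
--     nums = sorted(iterable)
--     if not nums:
--         return (None, None)
--     if len(nums) == 1:
--         return (nums[0], nums[0])
--     cands = [nums[0] * nums[1], nums[0] * nums[-1], nums[-1] * nums[-2]]
--     return (min(cands), max(cands))
-- ===== Notes on version B (the rewrite author's own statement) =====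
-- stated objective: simpler
-- what changed: Replaces A's streaming top-2/bottom-2 tracking with sign-case match by sort-then-pick: sort, take the two smallest and two largest, and return min/max over the three candidate products.
import Mathlib
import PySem

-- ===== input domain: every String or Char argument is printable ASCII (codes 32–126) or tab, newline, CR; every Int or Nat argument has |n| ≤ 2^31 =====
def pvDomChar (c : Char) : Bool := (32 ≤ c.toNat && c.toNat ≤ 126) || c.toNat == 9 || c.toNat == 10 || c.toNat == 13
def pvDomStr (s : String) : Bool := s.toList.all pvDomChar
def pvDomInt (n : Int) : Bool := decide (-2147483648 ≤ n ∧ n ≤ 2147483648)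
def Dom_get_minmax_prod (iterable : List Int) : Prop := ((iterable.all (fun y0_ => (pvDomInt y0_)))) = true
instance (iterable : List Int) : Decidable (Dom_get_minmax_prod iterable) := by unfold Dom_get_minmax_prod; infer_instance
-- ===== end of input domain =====

-- B replaces A's streaming top-2/bottom-2 tracking + sign-case match by sort-then-pick-extremes: simpler, same result.


-- ===== PORT A =====
-- the loop body of A: update (min1, min2, max1, max2) with one element elm
def pvStepA (s : Int × Int × Int × Int) (elm : Int) : Int × Int × Int × Int :=
  let (min1, min2, max1, max2) := s
  ( if elm < min1 then elm else min1,
    if elm < min1 then min1 else if elm < min2 then elm else min2,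
    if max1 < elm then elm else max1,
    if max1 < elm then max1 else if max2 < elm then elm else max2 )

def get_minmax_prod (iterable : List Int) : Option Int × Option Int :=
  match iterable with
  | [] => (none, none)                    -- empty input
  | [x] => (some x, some x)               -- single value
  | a :: b :: rest =>
    -- initial swaps so that min1 ≤ min2 and max2 ≤ max1
    let min1 := if b < a then b else a
    let min2 := if b < a then a else b
    let max1 := if a < b then b else a
    let max2 := if a < b then a else b
    let st := rest.foldl pvStepA (min1, min2, max1, max2)
    let min_prod := st.1 * st.2.1
    let max_prod := st.2.2.1 * st.2.2.2
    match decide (st.1 < 0), decide (st.2.2.1 < 0) with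
    | true, true => (some max_prod, some min_prod)
    | true, false => (some (st.1 * st.2.2.1), some (if max_prod < min_prod then min_prod else max_prod))
    | false, false => (some min_prod, some max_prod)
    | false, true => (none, none)         -- no Python 'case' matches: result keeps its initial (None, None)

-- ===== PORT B =====
def get_minmax_prod_alt (iterable : List Int) : Option Int × Option Int :=
  let nums := PySem.List.sorted iterable (fun x => x) false
  match nums, nums.reverse with
  | [], _ => (none, none)
  | [x], _ => (some x, some x)
  | a :: b :: _, d :: c :: _ =>          -- a = nums[0], b = nums[1], d = nums[-1], c = nums[-2]
    let cands := [a * b, a * d, d * c]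
    (PySem.List.min? cands (fun x => x), PySem.List.max? cands (fun x => x))
  | _ :: _ :: _, _ => (none, none)       -- unreachable: the reverse of a ≥2-element list has ≥2 elements

-- ===== PRECONDITION & SPEC =====
def Spec_get_minmax_prod (iterable : List Int) (out : Option Int × Option Int) : Prop := out = get_minmax_prod_alt iterable
instance (iterable : List Int) (out : Option Int × Option Int) : Decidable (Spec_get_minmax_prod iterable out) := by unfold Spec_get_minmax_prod; infer_instance

-- ===== CLAIM (what is proved, stated in full; the proofs are below) =====
def Claim_equal_get_minmax_prod : Prop := ∀ (iterable : List Int), Dom_get_minmax_prod iterable → Spec_get_minmax_prod iterable (get_minmax_prod iterable)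

-- ===== LEMMAS AND PROOFS =====

-- (m1, m2) are the smallest and second-smallest elements of the multiset s
def Inv2min (s : Multiset Int) (m1 m2 : Int) : Prop :=
  m1 ∈ s ∧ (∀ x ∈ s, m1 ≤ x) ∧ m2 ∈ s.erase m1 ∧ (∀ x ∈ s.erase m1, m2 ≤ x)

-- (M1, M2) are the largest and second-largest elements of the multiset s
def Inv2max (s : Multiset Int) (M1 M2 : Int) : Prop :=
  M1 ∈ s ∧ (∀ x ∈ s, x ≤ M1) ∧ M2 ∈ s.erase M1 ∧ (∀ x ∈ s.erase M1, x ≤ M2)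

theorem inv2min_le {s : Multiset Int} {m1 m2 : Int} (h : Inv2min s m1 m2) : m1 ≤ m2 :=
  h.2.1 m2 (Multiset.mem_of_mem_erase h.2.2.1)

theorem inv2max_le {s : Multiset Int} {M1 M2 : Int} (h : Inv2max s M1 M2) : M2 ≤ M1 :=
  h.2.1 M2 (Multiset.mem_of_mem_erase h.2.2.1)

theorem inv2min_step {s : Multiset Int} {m1 m2 : Int} (e : Int) (h : Inv2min s m1 m2) :
    Inv2min (e ::ₘ s) (if e < m1 then e else m1) (if e < m1 then m1 else if e < m2 then e else m2) := by
  obtain ⟨hm1, hb1, hm2, hb2⟩ := h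
  have h12 : m1 ≤ m2 := hb1 m2 (Multiset.mem_of_mem_erase hm2)
  by_cases h1 : e < m1
  · simp only [if_pos h1]
    refine ⟨Multiset.mem_cons_self e s, ?_, ?_, ?_⟩
    · intro x hx
      rcases Multiset.mem_cons.1 hx with rfl | hx
      · exact le_refl x
      · exact le_trans (le_of_lt h1) (hb1 x hx)
    · rw [Multiset.erase_cons_head]; exact hm1
    · rw [Multiset.erase_cons_head]; exact hb1
  · simp only [if_neg h1]
    push_neg at h1
    by_cases h2 : e < m2
    · simp only [if_pos h2]
      refine ⟨Multiset.mem_cons_of_mem hm1, ?_, ?_, ?_⟩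
      · intro x hx
        rcases Multiset.mem_cons.1 hx with rfl | hx
        · exact h1
        · exact hb1 x hx
      · by_cases he : e = m1
        · subst he; rw [Multiset.erase_cons_head]; exact hm1
        · rw [Multiset.erase_cons_tail _ he]
          exact Multiset.mem_cons_self e _
      · by_cases he : e = m1
        · subst he; rw [Multiset.erase_cons_head]
          intro x hx; exact hb1 x hx
        · rw [Multiset.erase_cons_tail _ he]
          intro x hx
          rcases Multiset.mem_cons.1 hx with rfl | hx
          · exact le_refl x
          · exact le_trans (le_of_lt h2) (hb2 x hx)
    · simp only [if_neg h2]
      push_neg at h2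
      refine ⟨Multiset.mem_cons_of_mem hm1, ?_, ?_, ?_⟩
      · intro x hx
        rcases Multiset.mem_cons.1 hx with rfl | hx
        · exact h1
        · exact hb1 x hx
      · by_cases he : e = m1
        · subst he; rw [Multiset.erase_cons_head]
          exact Multiset.mem_of_mem_erase hm2
        · rw [Multiset.erase_cons_tail _ he]
          exact Multiset.mem_cons_of_mem hm2
      · by_cases he : e = m1
        · subst he; rw [Multiset.erase_cons_head]
          intro x hx
          have hm : m2 = e := le_antisymm h2 h12
          rw [hm]; exact hb1 x hx
        · rw [Multiset.erase_cons_tail _ he]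
          intro x hx
          rcases Multiset.mem_cons.1 hx with rfl | hx
          · exact h2
          · exact hb2 x hx

theorem inv2max_step {s : Multiset Int} {M1 M2 : Int} (e : Int) (h : Inv2max s M1 M2) :
    Inv2max (e ::ₘ s) (if M1 < e then e else M1) (if M1 < e then M1 else if M2 < e then e else M2) := by
  obtain ⟨hm1, hb1, hm2, hb2⟩ := h
  have h12 : M2 ≤ M1 := hb1 M2 (Multiset.mem_of_mem_erase hm2)
  by_cases h1 : M1 < e
  · simp only [if_pos h1]
    refine ⟨Multiset.mem_cons_self e s, ?_, ?_, ?_⟩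
    · intro x hx
      rcases Multiset.mem_cons.1 hx with rfl | hx
      · exact le_refl x
      · exact le_trans (hb1 x hx) (le_of_lt h1)
    · rw [Multiset.erase_cons_head]; exact hm1
    · rw [Multiset.erase_cons_head]; exact hb1
  · simp only [if_neg h1]
    push_neg at h1
    by_cases h2 : M2 < e
    · simp only [if_pos h2]
      refine ⟨Multiset.mem_cons_of_mem hm1, ?_, ?_, ?_⟩
      · intro x hx
        rcases Multiset.mem_cons.1 hx with rfl | hx
        · exact h1
        · exact hb1 x hx
      · by_cases he : e = M1
        · subst he; rw [Multiset.erase_cons_head]; exact hm1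
        · rw [Multiset.erase_cons_tail _ he]
          exact Multiset.mem_cons_self e _
      · by_cases he : e = M1
        · subst he; rw [Multiset.erase_cons_head]
          intro x hx; exact hb1 x hx
        · rw [Multiset.erase_cons_tail _ he]
          intro x hx
          rcases Multiset.mem_cons.1 hx with rfl | hx
          · exact le_refl x
          · exact le_trans (hb2 x hx) (le_of_lt h2)
    · simp only [if_neg h2]
      push_neg at h2
      refine ⟨Multiset.mem_cons_of_mem hm1, ?_, ?_, ?_⟩
      · intro x hx
        rcases Multiset.mem_cons.1 hx with rfl | hx
        · exact h1
        · exact hb1 x hx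
      · by_cases he : e = M1
        · subst he; rw [Multiset.erase_cons_head]
          exact Multiset.mem_of_mem_erase hm2
        · rw [Multiset.erase_cons_tail _ he]
          exact Multiset.mem_cons_of_mem hm2
      · by_cases he : e = M1
        · subst he; rw [Multiset.erase_cons_head]
          intro x hx
          have hm : M2 = e := le_antisymm h12 h2
          rw [hm]; exact hb1 x hx
        · rw [Multiset.erase_cons_tail _ he]
          intro x hx
          rcases Multiset.mem_cons.1 hx with rfl | hx
          · exact h2
          · exact hb2 x hx

theorem inv2min_unique {s : Multiset Int} {m1 m2 a b : Int}
    (h : Inv2min s m1 m2) (h' : Inv2min s a b) : m1 = a ∧ m2 = b := by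
  have h1 : m1 = a := le_antisymm (h.2.1 a h'.1) (h'.2.1 m1 h.1)
  subst h1
  exact ⟨rfl, le_antisymm (h.2.2.2 b h'.2.2.1) (h'.2.2.2 m2 h.2.2.1)⟩

theorem inv2max_unique {s : Multiset Int} {M1 M2 a b : Int}
    (h : Inv2max s M1 M2) (h' : Inv2max s a b) : M1 = a ∧ M2 = b := by
  have h1 : M1 = a := le_antisymm (h'.2.1 M1 h.1) (h.2.1 a h'.1)
  subst h1
  exact ⟨rfl, le_antisymm (h'.2.2.2 M2 h.2.2.1) (h.2.2.2 b h'.2.2.1)⟩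

-- the invariant is preserved by A's whole loop
theorem fold_inv (rest : List Int) :
    ∀ (m1 m2 M1 M2 : Int) (s : Multiset Int), Inv2min s m1 m2 → Inv2max s M1 M2 →
    Inv2min (s + ↑rest) (rest.foldl pvStepA (m1, m2, M1, M2)).1 (rest.foldl pvStepA (m1, m2, M1, M2)).2.1 ∧
    Inv2max (s + ↑rest) (rest.foldl pvStepA (m1, m2, M1, M2)).2.2.1 (rest.foldl pvStepA (m1, m2, M1, M2)).2.2.2 := by
  induction rest with
  | nil => intro m1 m2 M1 M2 s h1 h2; simpa using ⟨h1, h2⟩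
  | cons e t ih =>
    intro m1 m2 M1 M2 s h1 h2
    have hs : s + ↑(e :: t) = (e ::ₘ s) + ↑t := by
      rw [← Multiset.cons_coe, Multiset.add_cons, Multiset.cons_add]
    simp only [List.foldl_cons]
    have hstep : pvStepA (m1, m2, M1, M2) e =
      (if e < m1 then e else m1, if e < m1 then m1 else if e < m2 then e else m2,
       if M1 < e then e else M1, if M1 < e then M1 else if M2 < e then e else M2) := rfl
    rw [hstep, hs]
    exact ih _ _ _ _ (e ::ₘ s) (inv2min_step e h1) (inv2max_step e h2)

-- the first two elements of a ≤-sorted list are the two smallest elements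
theorem inv2min_of_pairwise (p q : Int) (t : List Int)
    (h : (p :: q :: t).Pairwise (· ≤ ·)) : Inv2min ↑(p :: q :: t) p q := by
  rw [List.pairwise_cons] at h
  obtain ⟨hp, h⟩ := h
  rw [List.pairwise_cons] at h
  obtain ⟨hq, _⟩ := h
  refine ⟨by simp, ?_, ?_, ?_⟩
  · intro x hx
    rcases Multiset.mem_coe.1 hx with _ | hx
    · exact le_refl p
    · exact hp x (by assumption)
  · rw [← Multiset.cons_coe, Multiset.erase_cons_head]
    simp
  · rw [← Multiset.cons_coe, Multiset.erase_cons_head]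
    intro x hx
    rcases Multiset.mem_coe.1 hx with _ | hx
    · exact le_refl q
    · exact hq x (by assumption)

-- the first two elements of a ≥-sorted list are the two largest elements
theorem inv2max_of_pairwise (d c : Int) (t : List Int)
    (h : (d :: c :: t).Pairwise (fun x y => y ≤ x)) : Inv2max ↑(d :: c :: t) d c := by
  rw [List.pairwise_cons] at h
  obtain ⟨hd, h⟩ := h
  rw [List.pairwise_cons] at h
  obtain ⟨hc, _⟩ := h
  refine ⟨by simp, ?_, ?_, ?_⟩
  · intro x hx
    rcases Multiset.mem_coe.1 hx with _ | hx
    · exact le_refl d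
    · exact hd x (by assumption)
  · rw [← Multiset.cons_coe, Multiset.erase_cons_head]
    simp
  · rw [← Multiset.cons_coe, Multiset.erase_cons_head]
    intro x hx
    rcases Multiset.mem_coe.1 hx with _ | hx
    · exact le_refl c
    · exact hc x (by assumption)

-- A's initial swap of the first two elements satisfies the invariant on {a, b}
theorem inv2min_pair (a b : Int) :
    Inv2min ↑[a, b] (if b < a then b else a) (if b < a then a else b) := by
  by_cases h : b < a
  · simp only [if_pos h]
    refine ⟨by simp, ?_, ?_, ?_⟩
    · intro x hx
      rcases Multiset.mem_coe.1 hx with _ | hx <;> simp_all <;> omega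
    · rw [show ((↑[a, b] : Multiset Int)) = a ::ₘ b ::ₘ 0 by rfl,
         Multiset.erase_cons_tail _ (by omega)]
      simp
    · rw [show ((↑[a, b] : Multiset Int)) = a ::ₘ b ::ₘ 0 by rfl,
         Multiset.erase_cons_tail _ (by omega)]
      intro x hx
      rcases Multiset.mem_cons.1 hx with rfl | hx
      · exact le_refl x
      · simp_all
  · simp only [if_neg h]
    push_neg at h
    refine ⟨by simp, ?_, ?_, ?_⟩
    · intro x hx
      rcases Multiset.mem_coe.1 hx with _ | hx <;> simp_all <;> omega
    · rw [show ((↑[a, b] : Multiset Int)) = a ::ₘ b ::ₘ 0 by rfl,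
         Multiset.erase_cons_head]
      simp
    · rw [show ((↑[a, b] : Multiset Int)) = a ::ₘ b ::ₘ 0 by rfl,
         Multiset.erase_cons_head]
      intro x hx
      simp_all

theorem inv2max_pair (a b : Int) :
    Inv2max ↑[a, b] (if a < b then b else a) (if a < b then a else b) := by
  by_cases h : a < b
  · simp only [if_pos h]
    refine ⟨by simp, ?_, ?_, ?_⟩
    · intro x hx
      rcases Multiset.mem_coe.1 hx with _ | hx <;> simp_all <;> omega
    · rw [show ((↑[a, b] : Multiset Int)) = a ::ₘ b ::ₘ 0 by rfl,
         Multiset.erase_cons_tail _ (by omega)]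
      simp
    · rw [show ((↑[a, b] : Multiset Int)) = a ::ₘ b ::ₘ 0 by rfl,
         Multiset.erase_cons_tail _ (by omega)]
      intro x hx
      rcases Multiset.mem_cons.1 hx with rfl | hx
      · exact le_refl x
      · simp_all
  · simp only [if_neg h]
    push_neg at h
    refine ⟨by simp, ?_, ?_, ?_⟩
    · intro x hx
      rcases Multiset.mem_coe.1 hx with _ | hx <;> simp_all <;> omega
    · rw [show ((↑[a, b] : Multiset Int)) = a ::ₘ b ::ₘ 0 by rfl,
         Multiset.erase_cons_head]
      simp
    · rw [show ((↑[a, b] : Multiset Int)) = a ::ₘ b ::ₘ 0 by rfl,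
         Multiset.erase_cons_head]
      intro x hx
      simp_all

-- A's sign-based case analysis on the extremes agrees with min/max over B's three candidate products
theorem pv_minmax_arith (p q c d : Int) (hpq : p ≤ q) (hcd : c ≤ d) (hpc : p ≤ c) (hqd : q ≤ d) :
    (match decide (p < 0), decide (d < 0) with
     | true, true => (some (d * c), some (p * q))
     | true, false => (some (p * d), some (if d * c < p * q then p * q else d * c))
     | false, false => (some (p * q), some (d * c))
     | false, true => ((none : Option Int), (none : Option Int)))
    = (some (min (min (p * q) (p * d)) (d * c)), some (max (max (p * q) (p * d)) (d * c))) := by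
  rcases lt_or_ge p 0 with hp | hp
  · rcases lt_or_ge d 0 with hd | hd
    · have e1 : decide (p < 0) = true := decide_eq_true hp
      have e2 : decide (d < 0) = true := decide_eq_true hd
      have h1 : p * d ≤ p * q := by nlinarith
      have h2 : d * c ≤ p * d := by nlinarith
      rw [e1, e2]
      simp only [min_eq_right h1, min_eq_right h2, max_eq_left h1, max_eq_left (h2.trans h1)]
    · have e1 : decide (p < 0) = true := decide_eq_true hp
      have e2 : decide (d < 0) = false := decide_eq_false (not_lt.2 hd)
      have h1 : p * d ≤ p * q := by nlinarith
      have h2 : p * d ≤ d * c := by nlinarith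
      rw [e1, e2]
      simp only [min_eq_right h1, min_eq_left h2, max_eq_left h1]
      rcases lt_or_ge (d * c) (p * q) with h3 | h3
      · simp only [if_pos h3, max_eq_left (le_of_lt h3)]
      · simp only [if_neg (not_lt.2 h3), max_eq_right h3]
  · rcases lt_or_ge d 0 with hd | hd
    · exfalso; omega
    · have e1 : decide (p < 0) = false := decide_eq_false (not_lt.2 hp)
      have e2 : decide (d < 0) = false := decide_eq_false (not_lt.2 hd)
      have hq0 : 0 ≤ q := hp.trans hpq
      have h1 : p * q ≤ p * d := by nlinarith
      have h2 : p * q ≤ d * c := by nlinarith [mul_le_mul hpc hqd hq0 (hp.trans hpc)]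
      have h3 : p * d ≤ d * c := by nlinarith
      rw [e1, e2]
      simp only [min_eq_left h1, min_eq_left h2, max_eq_right h1, max_eq_right h3]

-- ===== VERDICT (by name: the statement is the Claim_ definition above) =====
theorem get_minmax_prod_spec : Claim_equal_get_minmax_prod := by
  intro xs _
  unfold Spec_get_minmax_prod
  rcases xs with _ | ⟨a, _ | ⟨b, rest⟩⟩
  · rfl
  · rfl
  · -- shape of the sorted list
    have hlen : (PySem.List.sorted (a :: b :: rest) (fun x => x) false).length = rest.length + 2 := by
      rw [PySem.List.length_sorted]; simp
    obtain ⟨p, q, t, hL⟩ : ∃ p q t, PySem.List.sorted (a :: b :: rest) (fun x => x) false = p :: q :: t := by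
      rcases hE : PySem.List.sorted (a :: b :: rest) (fun x => x) false with _ | ⟨p, _ | ⟨q, t⟩⟩
      · rw [hE] at hlen; simp at hlen
      · rw [hE] at hlen; simp at hlen
      · exact ⟨p, q, t, rfl⟩
    have hlenrev : (p :: q :: t).reverse.length = t.length + 2 := by simp
    obtain ⟨d, c, t', hR⟩ : ∃ d c t', (p :: q :: t).reverse = d :: c :: t' := by
      rcases hE : (p :: q :: t).reverse with _ | ⟨d, _ | ⟨c, t'⟩⟩
      · rw [hE] at hlenrev; simp at hlenrev
      · rw [hE] at hlenrev; simp at hlenrev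
      · exact ⟨d, c, t', rfl⟩
    have hpw : (p :: q :: t).Pairwise (· ≤ ·) := by
      have h0 := PySem.List.sorted_pairwise (xs := a :: b :: rest) (key := fun x => x)
      rw [hL] at h0; exact h0
    have hpwr : (d :: c :: t').Pairwise (fun x y => y ≤ x) := by
      have h0 := (List.pairwise_reverse (l := p :: q :: t)).2 hpw
      rw [hR] at h0; exact h0
    have hIminL : Inv2min ↑(p :: q :: t) p q := inv2min_of_pairwise p q t hpw
    have hImaxL : Inv2max ↑(p :: q :: t) d c := by
      have h1 := inv2max_of_pairwise d c t' hpwr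
      rwa [← hR, Multiset.coe_reverse] at h1
    have hMeq : (↑[a, b] : Multiset Int) + ↑rest = ↑(p :: q :: t) := by
      rw [Multiset.coe_add]
      refine Multiset.coe_eq_coe.2 ?_
      have h0 := PySem.List.sorted_perm (xs := a :: b :: rest) (key := fun x => x) false
      rw [hL] at h0
      exact h0.symm
    have hfold := fold_inv rest _ _ _ _ ↑[a, b] (inv2min_pair a b) (inv2max_pair a b)
    rw [hMeq] at hfold
    obtain ⟨hfmin, hfmax⟩ := hfold
    obtain ⟨e1, e2⟩ := inv2min_unique hfmin hIminL
    obtain ⟨e3, e4⟩ := inv2max_unique hfmax hImaxL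
    have hpq : p ≤ q := inv2min_le hIminL
    have hcd : c ≤ d := inv2max_le hImaxL
    have hpc : p ≤ c := hIminL.2.1 c (Multiset.mem_of_mem_erase hImaxL.2.2.1)
    have hqd : q ≤ d := hImaxL.2.1 q (Multiset.mem_of_mem_erase hIminL.2.2.1)
    simp only [get_minmax_prod, get_minmax_prod_alt, hL, hR]
    rw [e1, e2, e3, e4, pv_minmax_arith p q c d hpq hcd hpc hqd]
    simp [PySem.List.min?_id_cons, PySem.List.max?_id_cons, List.foldl]
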